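-- pv_equiv track=rewrite | github.com/JemPak/PyProjects | ConversionesBinarias.py | DecimalAbabilonio
-- ===== SOURCE A (Python) =====
-- def sobras(num):
--    decena = "<"
--    unidad = "y"
--    U_d = num//10
--    U_u = num-U_d*10
--    cadena = decena*U_d + unidad*U_u
--    return cadena
--
-- def DecimalAbabilonio(num):
--    """funcion que convierte un decimal en numero babilonio"""
--    result = []
--    index = 0
--    conter = 0
--    while True:
--       if 60**index > num:
--          index -= 1
--          break
--       else:
--          index += 1
--    while index!=-1:
--       middle = 60**index
--       cont = 0
--       while middle*cont <= num:
--          cont += 1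
--       middle *= cont-1
--       num -= middle
--       result += [sobras(cont-1)]
--       index -= 1
--    return result
-- ===== SOURCE B (Python) =====
-- def sobras(num):
--    decena = "<"
--    unidad = "y"
--    U_d = num//10
--    U_u = num-U_d*10
--    cadena = decena*U_d + unidad*U_u
--    return cadena
--
-- def DecimalAbabilonio(num):
--    """funcion que convierte un decimal en numero babilonio"""
--    digits = []
--    while num > 0:
--       num, r = divmod(num, 60)
--       digits.append(sobras(r))
--    digits.reverse()
--    return digits
-- ===== Notes on version B (the rewrite author's own statement) =====
-- stated objective: simpler
-- what changed: Replaced A's initial power-finding loop and per-position repeated-subtraction digit counting (most-significant first) with a single divmod loop collecting digits least-significant first and reversing at the end.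
import Mathlib
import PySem

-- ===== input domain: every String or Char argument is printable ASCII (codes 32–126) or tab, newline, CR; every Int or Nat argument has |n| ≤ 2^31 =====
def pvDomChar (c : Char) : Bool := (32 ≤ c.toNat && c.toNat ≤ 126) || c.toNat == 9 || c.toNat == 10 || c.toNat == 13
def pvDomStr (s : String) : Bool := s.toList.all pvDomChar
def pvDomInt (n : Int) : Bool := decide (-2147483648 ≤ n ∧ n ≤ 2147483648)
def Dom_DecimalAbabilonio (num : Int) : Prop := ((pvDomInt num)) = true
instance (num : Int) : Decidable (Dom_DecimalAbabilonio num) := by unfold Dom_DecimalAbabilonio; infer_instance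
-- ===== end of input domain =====

-- B replaces A's power search + repeated-subtraction digit counting by one LSB-first divmod
-- loop reversed at the end (objective: simpler); return values are proved equal for all ints.

-- ===== PORT A =====
-- helper sobras: "<"*U_d + "y"*U_u, built over List Char (Python's str*n with n ≤ 0 is "")
def sobras (num : Int) : String :=
  let U_d := PySem.Int.floordiv num 10
  let U_u := num - U_d * 10
  String.mk (List.replicate U_d.toNat '<' ++ List.replicate U_u.toNat 'y')

-- first while-True loop of A: smallest index with 60**index > num, minus 1 (fuel is a guard only)
def pvFindIndex (num : Int) : Nat → Nat → Int
  | i, 0 => (i : Int) - 1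
  | i, fuel+1 => if 60 ^ i > num then (i : Int) - 1 else pvFindIndex num (i+1) fuel

-- inner 'while middle*cont <= num' counting loop (fuel is a guard only)
def pvCount (middle num : Int) : Int → Nat → Int
  | cont, 0 => cont
  | cont, fuel+1 => if middle * cont ≤ num then pvCount middle num (cont+1) fuel else cont

-- outer 'while index != -1' loop (index ≥ 0 whenever the exponent is taken, so toNat is exact there)
def pvLoopA (num index : Int) (result : List String) : Nat → List String
  | 0 => result
  | fuel+1 =>
    if index ≠ -1 then
      let middle := (60:Int) ^ index.toNat
      let cont := pvCount middle num 0 (num.toNat + 2)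
      let middle2 := middle * (cont - 1)
      pvLoopA (num - middle2) (index - 1) (result ++ [sobras (cont - 1)]) fuel
    else result

def DecimalAbabilonio (num : Int) : List String :=
  let index := pvFindIndex num 0 (num.toNat + 1)
  pvLoopA num index [] (index + 1).toNat

-- ===== PORT B =====
-- 'while num > 0: num, r = divmod(num, 60); digits.append(sobras(r))' (fuel is a guard only)
def pvLoopB (num : Int) (digits : List String) : Nat → List String
  | 0 => digits
  | fuel+1 =>
    if num > 0 then
      pvLoopB (PySem.Int.floordiv num 60) (digits ++ [sobras (PySem.Int.mod num 60)]) fuel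
    else digits

def DecimalAbabilonio_alt (num : Int) : List String :=
  (pvLoopB num [] (num.toNat + 1)).reverse

-- ===== PRECONDITION & SPEC =====
def Spec_DecimalAbabilonio (num : Int) (out : List String) : Prop := out = DecimalAbabilonio_alt num
instance (num : Int) (out : List String) : Decidable (Spec_DecimalAbabilonio num out) := by unfold Spec_DecimalAbabilonio; infer_instance

-- ===== CLAIM (what is proved, stated in full; the proofs are below) =====
def Claim_equal_DecimalAbabilonio : Prop := ∀ (num : Int), Dom_DecimalAbabilonio num → Spec_DecimalAbabilonio num (DecimalAbabilonio num)

-- ===== LEMMAS AND PROOFS =====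

-- the digit list A's outer loop produces: most-significant first, length k+1
def pvMsb : Nat → Nat → List Nat
  | n, 0 => [n]
  | n, k+1 => n / 60^(k+1) :: pvMsb (n % 60^(k+1)) k

theorem pvCount_spec : ∀ (fuel : Nat) (c m n : Nat), 1 ≤ m → m * c ≤ n → n / m + 2 ≤ c + fuel →
    pvCount (m : Int) (n : Int) (c : Int) fuel = ((n / m : Nat) : Int) + 1 := by
  intro fuel
  induction fuel with
  | zero =>
    intro c m n hm hc hf
    have : c ≤ n / m := (Nat.le_div_iff_mul_le (by omega)).2 (by rw [Nat.mul_comm]; omega)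
    omega
  | succ f ih =>
    intro c m n hm hc hf
    have hcond : (m : Int) * (c : Int) ≤ (n : Int) := by exact_mod_cast hc
    rw [pvCount, if_pos hcond]
    by_cases h2 : m * (c + 1) ≤ n
    · have : ((c : Int) + 1) = ((c + 1 : Nat) : Int) := by push_cast; ring
      rw [this]
      exact ih (c+1) m n hm h2 (by omega)
    · have hle : c ≤ n / m := (Nat.le_div_iff_mul_le (by omega)).2 (by rw [Nat.mul_comm]; omega)
      have hlt : n / m < c + 1 := (Nat.div_lt_iff_lt_mul (by omega)).2 (by rw [Nat.mul_comm (c+1)]; omega)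
      have hceq : c = n / m := by omega
      have hf1 : 1 ≤ f := by omega
      obtain ⟨f', rfl⟩ : ∃ f', f = f' + 1 := ⟨f - 1, by omega⟩
      have hcond2 : ¬ ((m : Int) * ((c : Int) + 1) ≤ (n : Int)) := by
        intro h; apply h2; exact_mod_cast h
      rw [pvCount, if_neg hcond2]
      omega

theorem pvLoopB_digits : ∀ (fuel : Nat) (n : Nat) (acc : List String), n < fuel →
    pvLoopB (n : Int) acc fuel = acc ++ (Nat.digits 60 n).map (fun d => sobras (Int.ofNat d)) := by
  intro fuel
  induction fuel with
  | zero => omega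
  | succ f ih =>
    intro n acc hn
    rcases Nat.eq_zero_or_pos n with h0 | h1
    · subst h0; simp [pvLoopB]
    · have hdiv : PySem.Int.floordiv (n : Int) 60 = ((n / 60 : Nat) : Int) := by
        exact_mod_cast PySem.Int.floordiv_natCast n 60
      have hmod : PySem.Int.mod (n : Int) 60 = ((n % 60 : Nat) : Int) := by
        exact_mod_cast PySem.Int.mod_natCast n 60
      have hpos : ((n : Int) > 0) := by exact_mod_cast h1
      rw [pvLoopB, if_pos hpos, hdiv, hmod,
        ih (n / 60) _ (by have := Nat.div_lt_self h1 (by norm_num : 1 < 60); omega),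
        Nat.digits_def' (by norm_num : 1 < 60) h1]
      simp

theorem pvFindIndex_spec : ∀ (fuel : Nat) (i : Nat) (n : Nat), 1 ≤ n → 60^i ≤ n →
    Nat.log 60 n + 2 ≤ i + fuel → pvFindIndex (n : Int) i fuel = (Nat.log 60 n : Int) := by
  intro fuel
  induction fuel with
  | zero =>
    intro i n h1 hle hf
    have : i ≤ Nat.log 60 n := (Nat.le_log_iff_pow_le (by norm_num) (by omega)).2 hle
    omega
  | succ f ih =>
    intro i n h1 hle hf
    have hcond : ¬ ((60:Int) ^ i > (n : Int)) := by
      push_neg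
      exact_mod_cast hle
    rw [pvFindIndex, if_neg hcond]
    by_cases h2 : 60 ^ (i+1) ≤ n
    · exact ih (i+1) n h1 h2 (by omega)
    · push_neg at h2
      have hlog : Nat.log 60 n < i + 1 := (Nat.log_lt_iff_lt_pow (by norm_num) (by omega)).2 h2
      have hilog : i ≤ Nat.log 60 n := (Nat.le_log_iff_pow_le (by norm_num) (by omega)).2 hle
      obtain ⟨f', rfl⟩ : ∃ f', f = f' + 1 := ⟨f - 1, by omega⟩
      have hcond2 : (60:Int) ^ (i+1) > (n : Int) := by exact_mod_cast h2
      rw [pvFindIndex, if_pos hcond2]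
      push_cast
      omega

theorem pvLoopA_msb : ∀ (k : Nat) (n : Nat) (acc : List String), n < 60^(k+1) →
    pvLoopA (n : Int) (k : Int) acc (k+1) = acc ++ (pvMsb n k).map (fun d => sobras (Int.ofNat d)) := by
  intro k
  induction k with
  | zero =>
    intro n acc hn
    have hpow0 : ((60:Int) ^ ((((0:Nat)):Int)).toNat) = ((1 : Nat) : Int) := by simp
    have hcount : pvCount (((1:Nat)) : Int) (n : Int) 0 ((n:Int).toNat + 2)
        = ((n / 1 : Nat) : Int) + 1 :=
      pvCount_spec ((n:Int).toNat + 2) 0 1 n (by omega) (by omega) (by simp only [Int.toNat_natCast]; omega)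
    rw [pvLoopA, if_pos (by decide : (((0:Nat)):Int) ≠ -1)]
    simp only [hpow0, hcount]
    simp [pvLoopA, pvMsb]
  | succ k ih =>
    intro n acc hn
    have hk : ((k+1 : Nat) : Int) ≠ -1 := by omega
    rw [pvLoopA, if_pos hk]
    have hpow : ((60:Int) ^ (((k+1 : Nat) : Int)).toNat) = ((60^(k+1) : Nat) : Int) := by
      simp
    have hcount : pvCount (((60^(k+1) : Nat)) : Int) (n : Int) 0 ((n:Int).toNat + 2)
        = ((n / 60^(k+1) : Nat) : Int) + 1 :=
      pvCount_spec ((n:Int).toNat + 2) 0 (60^(k+1)) n (Nat.one_le_pow _ _ (by norm_num)) (by omega)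
        (by have := Nat.div_le_self n (60^(k+1)); simp only [Int.toNat_natCast]; omega)
    have hsub : (n:Int) - ((60^(k+1) : Nat) : Int) * (((n / 60^(k+1) : Nat) : Int) + 1 - 1)
        = ((n % 60^(k+1) : Nat) : Int) := by
      have := Nat.div_add_mod n (60^(k+1))
      push_cast
      nlinarith [this]
    have hidx : ((k+1 : Nat) : Int) - 1 = ((k : Nat) : Int) := by push_cast; ring
    simp only [hpow, hcount, hsub, hidx]
    rw [ih (n % 60^(k+1)) _ (Nat.mod_lt _ (Nat.pow_pos (by norm_num)))]
    simp [pvMsb]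

theorem pvDigits_pad : ∀ (k : Nat) (d r : Nat), 1 ≤ d → d < 60 → r < 60^(k+1) →
    Nat.digits 60 (r + d * 60^(k+1)) =
      (Nat.digits 60 r ++ List.replicate (k+1 - (Nat.digits 60 r).length) (0:Nat)) ++ [d] := by
  intro k
  induction k with
  | zero =>
    intro d r hd1 hd2 hr
    have e60 : (60:Nat)^(0+1) = 60 := by norm_num
    rw [e60] at hr ⊢
    have hpos : 0 < r + d * 60 := by omega
    rw [Nat.digits_def' (by norm_num : 1 < 60) hpos]
    have hmod : (r + d * 60) % 60 = r := by
      rw [Nat.add_mul_mod_self_right, Nat.mod_eq_of_lt hr]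
    have hdivv : (r + d * 60) / 60 = d := by
      rw [Nat.add_mul_div_right _ _ (by norm_num : 0 < 60), Nat.div_eq_of_lt hr]
      omega
    have hdd : Nat.digits 60 d = [d] := by
      rw [Nat.digits_def' (by norm_num : 1 < 60) (by omega), Nat.mod_eq_of_lt hd2,
        Nat.div_eq_of_lt hd2]
      simp
    rw [hmod, hdivv, hdd]
    rcases Nat.eq_zero_or_pos r with h0 | h1
    · subst h0; simp
    · rw [Nat.digits_def' (by norm_num : 1 < 60) h1, Nat.mod_eq_of_lt hr, Nat.div_eq_of_lt hr]
      simp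
  | succ k ih =>
    intro d r hd1 hd2 hr
    have hpow : (0:Nat) < 60^(k+1) := Nat.pow_pos (by norm_num)
    have hpos : 0 < r + d * 60^(k+1+1) := by positivity
    rw [Nat.digits_def' (by norm_num : 1 < 60) hpos]
    have hsplit : r + d * 60^(k+1+1) = r + (d * 60^(k+1)) * 60 := by ring
    have hmod : (r + d * 60^(k+1+1)) % 60 = r % 60 := by
      rw [hsplit, Nat.add_mul_mod_self_right]
    have hdivv : (r + d * 60^(k+1+1)) / 60 = r / 60 + d * 60^(k+1) := by
      rw [hsplit, Nat.add_mul_div_right _ _ (by norm_num : 0 < 60)]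
    have hrdiv : r / 60 < 60^(k+1) := by
      rw [Nat.div_lt_iff_lt_mul (by norm_num : 0 < 60)]
      calc r < 60^(k+1+1) := hr
        _ = 60^(k+1) * 60 := by ring
    rw [hmod, hdivv, ih d (r / 60) hd1 hd2 hrdiv]
    rcases Nat.eq_zero_or_pos r with h0 | h1
    · subst h0
      simp [List.replicate_succ]
    · rw [Nat.digits_def' (by norm_num : 1 < 60) h1]
      simp only [List.length_cons]
      have : k + 1 + 1 - ((Nat.digits 60 (r/60)).length + 1) = k + 1 - (Nat.digits 60 (r/60)).length := by omega
      rw [this]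
      simp

theorem pvMsb_reverse : ∀ (k : Nat) (n : Nat), n < 60^(k+1) →
    (pvMsb n k).reverse = Nat.digits 60 n ++ List.replicate (k+1 - (Nat.digits 60 n).length) (0:Nat) := by
  intro k
  induction k with
  | zero =>
    intro n hn
    rcases Nat.eq_zero_or_pos n with h0 | h1
    · subst h0; simp [pvMsb]
    · rw [show (pvMsb n 0) = [n] from rfl,
        Nat.digits_def' (by norm_num : 1 < 60) h1, Nat.mod_eq_of_lt (by simpa using hn),
        Nat.div_eq_of_lt (by simpa using hn)]
      simp
  | succ k ih =>
    intro n hn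
    have hpow : (0:Nat) < 60^(k+1) := Nat.pow_pos (by norm_num)
    have hrlt : n % 60^(k+1) < 60^(k+1) := Nat.mod_lt _ hpow
    rw [show pvMsb n (k+1) = n / 60^(k+1) :: pvMsb (n % 60^(k+1)) k from rfl]
    rw [List.reverse_cons, ih _ hrlt]
    rcases Nat.eq_zero_or_pos (n / 60^(k+1)) with h0 | h1
    · have hnr : n % 60^(k+1) = n := by
        have := Nat.mod_eq_of_lt (a := n) (b := 60^(k+1)) (Nat.lt_of_div_eq_zero hpow h0)
        exact this
      have hlen : (Nat.digits 60 n).length ≤ k + 1 := by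
        rcases Nat.eq_zero_or_pos n with hz | hp
        · subst hz; simp
        · rw [Nat.length_digits 60 n (by norm_num) (by omega)]
          have := (Nat.log_lt_iff_lt_pow (by norm_num : 1 < 60) (by omega : n ≠ 0)).2
            (by rw [hnr] at hrlt; exact hrlt)
          omega
      rw [hnr, h0]
      have : k + 1 + 1 - (Nat.digits 60 n).length = (k + 1 - (Nat.digits 60 n).length) + 1 := by omega
      rw [this, List.replicate_succ' ]
      simp
    · have hd60 : n / 60^(k+1) < 60 := by
        rw [Nat.div_lt_iff_lt_mul hpow]
        calc n < 60^(k+1+1) := hn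
          _ = 60 * 60^(k+1) := by ring
      have hn_eq : n = n % 60^(k+1) + (n / 60^(k+1)) * 60^(k+1) := by
        have := Nat.div_add_mod n (60^(k+1))
        rw [Nat.mul_comm]
        omega
      have hpad := pvDigits_pad k (n / 60^(k+1)) (n % 60^(k+1)) h1 hd60 hrlt
      rw [← hn_eq] at hpad
      have hrlen : (Nat.digits 60 (n % 60^(k+1))).length ≤ k + 1 := by
        rcases Nat.eq_zero_or_pos (n % 60^(k+1)) with hz | hp
        · rw [hz]; simp
        · rw [Nat.length_digits 60 _ (by norm_num) (by omega)]
          have := (Nat.log_lt_iff_lt_pow (by norm_num : 1 < 60) (by omega)).2 hrlt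
          omega
      have hlen : (Nat.digits 60 n).length = k + 1 + 1 := by
        rw [hpad]
        simp
        omega
      rw [hlen]
      simp [hpad]

-- for n ≥ 1, A's index search lands on log₆₀ n and the padded MSB list is exactly the reversed digit list
theorem pvMsb_eq_digits_reverse (n : Nat) (h1 : 1 ≤ n) :
    pvMsb n (Nat.log 60 n) = (Nat.digits 60 n).reverse := by
  have hlt : n < 60 ^ (Nat.log 60 n + 1) := Nat.lt_pow_succ_log_self (by norm_num) n
  have h := pvMsb_reverse (Nat.log 60 n) n hlt
  have hlen : (Nat.digits 60 n).length = Nat.log 60 n + 1 :=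
    Nat.length_digits 60 n (by norm_num) (by omega)
  rw [hlen] at h
  simp at h
  calc pvMsb n (Nat.log 60 n) = (pvMsb n (Nat.log 60 n)).reverse.reverse := by simp
    _ = (Nat.digits 60 n).reverse := by rw [h]

-- ===== VERDICT (by name: the statement is the Claim_ definition above) =====
theorem DecimalAbabilonio_spec : Claim_equal_DecimalAbabilonio := by
  intro num _
  unfold Spec_DecimalAbabilonio DecimalAbabilonio DecimalAbabilonio_alt
  by_cases hpos : 0 < num
  · obtain ⟨n, rfl⟩ : ∃ n : Nat, num = (n : Int) := ⟨num.toNat, by omega⟩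
    have hn1 : 1 ≤ n := by exact_mod_cast hpos
    have hnt : ((n:Int)).toNat = n := by simp
    have hlogn : Nat.log 60 n + 2 ≤ 0 + (n + 1) := by
      have h1' : n < 60 ^ n := Nat.lt_pow_self (by norm_num)
      have := (Nat.log_lt_iff_lt_pow (by norm_num : 1 < 60) (by omega : n ≠ 0)).2 h1'
      omega
    have hidx : pvFindIndex (n : Int) 0 (((n:Int)).toNat + 1) = (Nat.log 60 n : Int) := by
      rw [hnt]
      exact pvFindIndex_spec (n+1) 0 n hn1 (by simpa) hlogn
    have hlt : n < 60 ^ (Nat.log 60 n + 1) := Nat.lt_pow_succ_log_self (by norm_num) n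
    have hfuel : (((Nat.log 60 n : Nat) : Int) + 1).toNat = Nat.log 60 n + 1 := by omega
    rw [hidx]
    show pvLoopA (n:Int) ((Nat.log 60 n : Nat) : Int) [] (((Nat.log 60 n : Nat) : Int) + 1).toNat
        = (pvLoopB (n:Int) [] (((n:Int)).toNat + 1)).reverse
    rw [hfuel, pvLoopA_msb (Nat.log 60 n) n [] hlt, hnt,
      pvLoopB_digits (n+1) n [] (by omega), pvMsb_eq_digits_reverse n hn1]
    simp only [List.nil_append, List.map_reverse]
  · have h0 : num.toNat = 0 := by omega
    have hidx : pvFindIndex num 0 (num.toNat + 1) = -1 := by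
      rw [h0, pvFindIndex, if_pos (by push_cast; omega : (60:Int) ^ (0:Nat) > num)]
      simp
    rw [hidx, h0]
    simp [pvLoopA, pvLoopB, hpos]
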